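-- pv_equiv track=rewrite | github.com/nasa/opera-sds-pcm | tools/ops/cmr_audit/cmr_audit_slc.py | cmr_products_native_id_pattern_diff
-- ===== SOURCE A (Python) =====
-- import functools
-- from collections import defaultdict
--
-- def cmr_products_native_id_pattern_diff(cmr_products, cmr_native_id_patterns):
--     product_type_and_acquisition_time_to_products_map = defaultdict(set)
--     for cmr_product in cmr_products:
--         product_type = "RTC" if "RTC" in cmr_product else "CSLC"
--         if product_type == "CSLC":
--             acquisition_time = cmr_product[33:48]
--         else:  # product_type == "RTC"
--             acquisition_time = cmr_product[32:47]
--         product_type_and_acquisition_time_to_products_map[(product_type, acquisition_time)].add(cmr_product)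
--
--     product_type_acquisition_time_to_native_id_pattern_map = defaultdict(set)
--     for native_id_pattern in cmr_native_id_patterns:
--         product_type = "RTC" if "RTC" in native_id_pattern else "CSLC"
--         if product_type == "CSLC":
--             acquisition_time = native_id_pattern[19:34]
--         else:  # product_type == "RTC"
--             acquisition_time = native_id_pattern[18:33]
--         product_type_acquisition_time_to_native_id_pattern_map[(product_type, acquisition_time)].add(native_id_pattern)
--
--     cmr_product_refs = product_type_and_acquisition_time_to_products_map.keys()
--     expected_product_refs = product_type_acquisition_time_to_native_id_pattern_map.keys()
--     missing_product_refs = expected_product_refs - cmr_product_refs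
--     missing_product_native_id_patterns = [product_type_acquisition_time_to_native_id_pattern_map[type_time] for type_time in missing_product_refs]
--     if not missing_product_native_id_patterns:
--         missing_product_native_id_patterns = set()
--     else:
--         missing_product_native_id_patterns = functools.reduce(set.union, missing_product_native_id_patterns)
--     return missing_product_native_id_patterns
-- ===== SOURCE B (Python) =====
-- def cmr_products_native_id_pattern_diff(cmr_products, cmr_native_id_patterns):
--     def product_key(s):
--         return ("RTC", s[32:47]) if "RTC" in s else ("CSLC", s[33:48])
--
--     def pattern_key(s):
--         return ("RTC", s[18:33]) if "RTC" in s else ("CSLC", s[19:34])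
--
--     product_keys = {product_key(p) for p in cmr_products}
--     return {p for p in cmr_native_id_patterns if pattern_key(p) not in product_keys}
-- ===== Notes on version B (the rewrite author's own statement) =====
-- stated objective: simpler
-- what changed: Replaced the two grouping defaultdicts, the keys() set-difference and the functools.reduce union by one set of product keys plus a single filtering set-comprehension over the patterns.
import Mathlib
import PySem

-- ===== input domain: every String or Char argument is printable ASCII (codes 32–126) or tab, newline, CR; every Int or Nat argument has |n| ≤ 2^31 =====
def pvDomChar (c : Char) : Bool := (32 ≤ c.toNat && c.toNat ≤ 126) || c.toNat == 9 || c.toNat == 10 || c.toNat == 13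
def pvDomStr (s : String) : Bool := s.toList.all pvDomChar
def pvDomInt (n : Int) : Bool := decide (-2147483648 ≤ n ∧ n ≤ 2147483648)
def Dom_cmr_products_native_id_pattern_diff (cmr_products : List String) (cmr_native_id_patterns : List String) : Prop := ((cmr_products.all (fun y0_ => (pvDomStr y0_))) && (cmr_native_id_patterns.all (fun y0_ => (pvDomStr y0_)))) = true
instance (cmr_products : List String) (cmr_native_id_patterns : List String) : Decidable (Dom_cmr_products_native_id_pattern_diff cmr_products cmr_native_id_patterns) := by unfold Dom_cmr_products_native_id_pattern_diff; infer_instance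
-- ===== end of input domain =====

-- B replaces A's two grouping dicts, keys() difference and reduce-union by one product-key set
-- plus a single filtering pass over the patterns (objective: simpler).
-- Both functions return a Python set; its iteration order is not modelled, so both ports return
-- the set as its sorted element list (the same finite set of strings).

-- ===== PORT A =====
-- shared key extraction, exactly A's (and B's) slice logic
def productKey (s : String) : String × String :=
  let product_type := if PySem.Str.isIn "RTC" s then "RTC" else "CSLC"
  let acquisition_time :=
    if product_type == "CSLC" then PySem.Str.slice s (some 33) (some 48)
    else PySem.Str.slice s (some 32) (some 47)
  (product_type, acquisition_time)

def patternKey (s : String) : String × String :=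
  let product_type := if PySem.Str.isIn "RTC" s then "RTC" else "CSLC"
  let acquisition_time :=
    if product_type == "CSLC" then PySem.Str.slice s (some 19) (some 34)
    else PySem.Str.slice s (some 18) (some 33)
  (product_type, acquisition_time)

def cmr_products_native_id_pattern_diff (cmr_products : List String) (cmr_native_id_patterns : List String) : List String :=
  -- defaultdict(set): map[(type, time)].add(item)
  let m1 : PySem.Dict (String × String) (PySem.Set String) :=
    cmr_products.foldl (fun d p => d.modify (productKey p) [] (fun s => PySem.Set.add s p)) PySem.Dict.empty
  let m2 : PySem.Dict (String × String) (PySem.Set String) :=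
    cmr_native_id_patterns.foldl (fun d p => d.modify (patternKey p) [] (fun s => PySem.Set.add s p)) PySem.Dict.empty
  -- expected_product_refs - cmr_product_refs
  let missing : PySem.Set (String × String) := PySem.Set.diff m2.keys m1.keys
  let lists : List (PySem.Set String) := missing.map (fun k => m2.getD k [])
  let res : PySem.Set String :=
    match lists with
    | [] => []                         -- 'if not …: set()'
    | h :: t => t.foldl PySem.Set.union h   -- functools.reduce(set.union, …)
  PySem.List.sorted res (fun x => x)   -- returned set, represented sorted

-- ===== PORT B =====
def cmr_products_native_id_pattern_diff_alt (cmr_products : List String) (cmr_native_id_patterns : List String) : List String :=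
  let product_keys : PySem.Set (String × String) := PySem.Set.ofList (cmr_products.map productKey)
  let res : PySem.Set String :=
    cmr_native_id_patterns.foldl
      (fun acc p => if PySem.Set.contains product_keys (patternKey p) then acc else PySem.Set.add acc p) []
  PySem.List.sorted res (fun x => x)   -- returned set, represented sorted

-- ===== PRECONDITION & SPEC =====
def Spec_cmr_products_native_id_pattern_diff (cmr_products : List String) (cmr_native_id_patterns : List String) (out : List String) : Prop := out = cmr_products_native_id_pattern_diff_alt cmr_products cmr_native_id_patterns
instance (cmr_products : List String) (cmr_native_id_patterns : List String) (out : List String) : Decidable (Spec_cmr_products_native_id_pattern_diff cmr_products cmr_native_id_patterns out) := by unfold Spec_cmr_products_native_id_pattern_diff; infer_instance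

-- ===== CLAIM (what is proved, stated in full; the proofs are below) =====
def Claim_equal_cmr_products_native_id_pattern_diff : Prop := ∀ (cmr_products : List String) (cmr_native_id_patterns : List String), Dom_cmr_products_native_id_pattern_diff cmr_products cmr_native_id_patterns → Spec_cmr_products_native_id_pattern_diff cmr_products cmr_native_id_patterns (cmr_products_native_id_pattern_diff cmr_products cmr_native_id_patterns)

-- ===== LEMMAS AND PROOFS =====

-- the grouping loop's group for key q is set(filter (key · = q))
theorem group_getD {α κ : Type} [BEq α] [LawfulBEq α] [BEq κ] [LawfulBEq κ] [DecidableEq κ]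
    (k : α → κ) (l : List α) (d : PySem.Dict κ (PySem.Set α)) (q : κ) :
    (l.foldl (fun d p => d.modify (k p) [] (fun s => PySem.Set.add s p)) d).getD q []
      = (l.filter (fun p => k p == q)).foldl PySem.Set.add (d.getD q []) := by
  induction l generalizing d with
  | nil => simp
  | cons p l ih =>
      rw [List.foldl_cons, List.filter_cons, ih]
      by_cases h : k p = q
      · subst h
        rw [if_pos (by simp), PySem.Dict.getD_modify, if_pos rfl, List.foldl_cons]
      · rw [if_neg (by simp [h]), PySem.Dict.getD_modify, if_neg (fun hq => h hq.symm)]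

theorem mem_foldl_union {α : Type} [BEq α] [LawfulBEq α]
    (t : List (PySem.Set α)) (h : PySem.Set α) (x : α) :
    x ∈ t.foldl PySem.Set.union h ↔ x ∈ h ∨ ∃ l ∈ t, x ∈ l := by
  induction t generalizing h with
  | nil => simp
  | cons a t ih =>
      simp only [List.foldl_cons, ih, PySem.Set.mem_union, List.mem_cons]
      constructor
      · rintro (⟨hx | hx⟩ | ⟨l, hl, hx⟩)
        · exact Or.inl hx
        · exact Or.inr ⟨a, Or.inl rfl, hx⟩
        · exact Or.inr ⟨l, Or.inr hl, hx⟩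
      · rintro (hx | ⟨l, (rfl | hl), hx⟩)
        · exact Or.inl (Or.inl hx)
        · exact Or.inl (Or.inr hx)
        · exact Or.inr ⟨l, hl, hx⟩

theorem nodup_foldl_union {α : Type} [BEq α] [LawfulBEq α]
    (t : List (PySem.Set α)) (h : PySem.Set α) (hh : h.Nodup) :
    (t.foldl PySem.Set.union h).Nodup := by
  induction t generalizing h with
  | nil => exact hh
  | cons a t ih => exact ih _ (PySem.Set.nodup_union _ _ hh)

-- B's filtering fold is set(filter (not member))
theorem filter_fold_eq {α κ : Type} [BEq α] [LawfulBEq α] [BEq κ] [LawfulBEq κ]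
    (k : α → κ) (pk : PySem.Set κ) (l : List α) (s : PySem.Set α) :
    l.foldl (fun acc p => if PySem.Set.contains pk (k p) then acc else PySem.Set.add acc p) s
      = (l.filter (fun p => !PySem.Set.contains pk (k p))).foldl PySem.Set.add s := by
  induction l generalizing s with
  | nil => rfl
  | cons p l ih =>
      cases hc : PySem.Set.contains pk (k p) with
      | true => rw [List.foldl_cons, if_pos hc, ih, List.filter_cons, if_neg (by rw [hc]; simp)]
      | false =>
          rw [List.foldl_cons, if_neg (by rw [hc]; simp), ih, List.filter_cons,
            if_pos (by rw [hc]; rfl), List.foldl_cons]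

theorem cmr_equal (cmr_products cmr_native_id_patterns : List String) :
    cmr_products_native_id_pattern_diff cmr_products cmr_native_id_patterns
      = cmr_products_native_id_pattern_diff_alt cmr_products cmr_native_id_patterns := by
  unfold cmr_products_native_id_pattern_diff cmr_products_native_id_pattern_diff_alt
  apply PySem.List.sorted_eq_sorted_of_perm _ _ _ (fun a b h => h)
  set m1 := cmr_products.foldl (fun d p => d.modify (productKey p) [] (fun s => PySem.Set.add s p)) PySem.Dict.empty with hm1
  set m2 := cmr_native_id_patterns.foldl (fun d p => d.modify (patternKey p) [] (fun s => PySem.Set.add s p)) PySem.Dict.empty with hm2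
  have hkeys1 : m1.keys = PySem.Set.ofList (cmr_products.map productKey) := by
    rw [hm1, PySem.Dict.keys_foldl_modify_key cmr_products productKey [] (fun _ p s => PySem.Set.add s p)]
    simp [PySem.Dict.keys_empty, PySem.Set.update, PySem.Set.ofList_eq_foldl]
  have hkeys2 : m2.keys = PySem.Set.ofList (cmr_native_id_patterns.map patternKey) := by
    rw [hm2, PySem.Dict.keys_foldl_modify_key cmr_native_id_patterns patternKey [] (fun _ p s => PySem.Set.add s p)]
    simp [PySem.Dict.keys_empty, PySem.Set.update, PySem.Set.ofList_eq_foldl]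
  have hget : ∀ q, m2.getD q [] = PySem.Set.ofList (cmr_native_id_patterns.filter (fun p => patternKey p == q)) := by
    intro q
    rw [hm2, group_getD, PySem.Dict.getD_empty, ← PySem.Set.ofList_eq_foldl]
  -- membership in A's result set
  have hmemA : ∀ x,
      (x ∈ (match (PySem.Set.diff m2.keys m1.keys).map (fun k => m2.getD k []) with
            | [] => ([] : PySem.Set String)
            | h :: t => t.foldl PySem.Set.union h)
        ↔ x ∈ cmr_native_id_patterns ∧ patternKey x ∉ m1.keys) := by
    intro x
    have hlist : ∀ (L : List (String × String)),
        (x ∈ (match L.map (fun k => m2.getD k []) with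
              | [] => ([] : PySem.Set String)
              | h :: t => t.foldl PySem.Set.union h)
          ↔ ∃ q ∈ L, x ∈ m2.getD q []) := by
      intro L
      cases L with
      | nil => simp
      | cons q L =>
          simp only [List.map_cons, mem_foldl_union, List.mem_cons, List.mem_map]
          constructor
          · rintro (hx | ⟨l, ⟨q', hq', rfl⟩, hx⟩)
            · exact ⟨q, Or.inl rfl, hx⟩
            · exact ⟨q', Or.inr hq', hx⟩
          · rintro ⟨q', (rfl | hq'), hx⟩
            · exact Or.inl hx
            · exact Or.inr ⟨_, ⟨q', hq', rfl⟩, hx⟩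
    rw [hlist]
    constructor
    · rintro ⟨q, hq, hx⟩
      rw [PySem.Set.mem_diff] at hq
      rw [hget q, PySem.Set.mem_ofList, List.mem_filter, beq_iff_eq] at hx
      exact ⟨hx.1, by rw [hx.2]; exact hq.2⟩
    · rintro ⟨hx, hnk⟩
      refine ⟨patternKey x, ?_, ?_⟩
      · rw [PySem.Set.mem_diff, hkeys2, PySem.Set.mem_ofList]
        exact ⟨List.mem_map_of_mem hx, hnk⟩
      · rw [hget, PySem.Set.mem_ofList, List.mem_filter]
        exact ⟨hx, by simp⟩
  -- membership in B's result set
  have hmemB : ∀ x,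
      (x ∈ cmr_native_id_patterns.foldl
          (fun acc p => if PySem.Set.contains (PySem.Set.ofList (cmr_products.map productKey)) (patternKey p) then acc
                        else PySem.Set.add acc p) ([] : PySem.Set String)
        ↔ x ∈ cmr_native_id_patterns ∧ patternKey x ∉ m1.keys) := by
    intro x
    rw [filter_fold_eq, ← PySem.Set.ofList_eq_foldl, PySem.Set.mem_ofList, List.mem_filter, hkeys1]
    constructor
    · rintro ⟨hx, hc⟩
      refine ⟨hx, fun hm => ?_⟩
      rw [← PySem.Set.contains_iff] at hm
      rw [hm] at hc
      simp at hc
    · rintro ⟨hx, hn⟩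
      refine ⟨hx, ?_⟩
      cases hcc : PySem.Set.contains (PySem.Set.ofList (cmr_products.map productKey)) (patternKey x) with
      | false => rfl
      | true => exact absurd ((PySem.Set.contains_iff _ _).mp hcc) hn
  -- both result sets are duplicate-free
  have hnodA : (match (PySem.Set.diff m2.keys m1.keys).map (fun k => m2.getD k []) with
        | [] => ([] : PySem.Set String)
        | h :: t => t.foldl PySem.Set.union h).Nodup := by
    cases hL : (PySem.Set.diff m2.keys m1.keys).map (fun k => m2.getD k []) with
    | nil => simp
    | cons h t =>
        apply nodup_foldl_union
        have hmem : h ∈ (PySem.Set.diff m2.keys m1.keys).map (fun k => m2.getD k []) := by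
          rw [hL]; exact List.mem_cons_self
        obtain ⟨q, _, rfl⟩ := List.mem_map.mp hmem
        rw [hget]
        exact PySem.Set.nodup_ofList _
  have hnodB : (cmr_native_id_patterns.foldl
      (fun acc p => if PySem.Set.contains (PySem.Set.ofList (cmr_products.map productKey)) (patternKey p) then acc
                    else PySem.Set.add acc p) ([] : PySem.Set String)).Nodup := by
    rw [filter_fold_eq, ← PySem.Set.ofList_eq_foldl]
    exact PySem.Set.nodup_ofList _
  exact (List.perm_ext_iff_of_nodup hnodA hnodB).mpr (fun x => (hmemA x).trans (hmemB x).symm)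

-- ===== VERDICT (by name: the statement is the Claim_ definition above) =====
theorem cmr_products_native_id_pattern_diff_spec : Claim_equal_cmr_products_native_id_pattern_diff := by
  intro cmr_products cmr_native_id_patterns _
  unfold Spec_cmr_products_native_id_pattern_diff
  exact cmr_equal cmr_products cmr_native_id_patterns
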